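-- pv_equiv track=rewrite | github.com/Nivdob/sandbox | courses/Algorithms_for_DNA_Sequencing/dnaseq.py | naive_approximate
-- ===== SOURCE A (Python) =====
-- def naive_approximate(t, p, n):
-- 	occurrences = []
-- 	for i in range(len(t) - len(p) + 1):
-- 		s = t[i:]
-- 		mismatches = len(p)
-- 		for j in range(len(p)):
-- 			if s[j] == p[j]:
-- 				mismatches -= 1
-- 				#if n < mismatches:
-- 				#	break
-- 		if n >= mismatches:
-- 			occurrences.append(i)
-- 	return occurrences
-- ===== SOURCE B (Python) =====
-- def naive_approximate(t, p, n):
-- 	width = len(t) - len(p) + 1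
-- 	counts = [0] * width
-- 	for j in range(len(p)):
-- 		counts = [c + (t[i + j] != p[j]) for i, c in enumerate(counts)]
-- 	return [i for i in range(len(counts)) if counts[i] <= n]
-- ===== Notes on version B (the rewrite author's own statement) =====
-- stated objective: alternative
-- what changed: Replaces A's per-window rescan (outer loop over alignments, inner scalar mismatch scan of each suffix window) by a column-major pass that maintains a per-alignment mismatch-count array, one pattern position at a time across all alignments, then filters the array.
import Mathlib
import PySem

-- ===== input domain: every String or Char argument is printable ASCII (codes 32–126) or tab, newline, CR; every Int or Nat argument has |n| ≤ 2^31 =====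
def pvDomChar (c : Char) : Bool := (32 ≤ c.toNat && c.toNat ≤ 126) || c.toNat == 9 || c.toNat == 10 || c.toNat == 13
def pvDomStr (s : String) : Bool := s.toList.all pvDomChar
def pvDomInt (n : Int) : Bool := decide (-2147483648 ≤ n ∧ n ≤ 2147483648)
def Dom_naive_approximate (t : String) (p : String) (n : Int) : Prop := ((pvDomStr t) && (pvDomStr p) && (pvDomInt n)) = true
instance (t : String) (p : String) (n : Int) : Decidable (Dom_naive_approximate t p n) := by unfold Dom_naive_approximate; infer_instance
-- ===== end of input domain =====

-- B replaces A's per-window rescans by a column-major maintained mismatch-count array (alternative decomposition, same cost).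

-- ===== PORT A =====
-- literal port of A: for each alignment i, take the suffix s = t[i:], count down
-- from len(p) on each matching character, and append i when n ≥ mismatches.
def naive_approximate (t : String) (p : String) (n : Int) : List Int :=
  let tl := t.toList
  let pl := p.toList
  (PySem.List.pyRange 0 ((tl.length : Int) - (pl.length : Int) + 1)).foldl
    (fun occurrences i =>
      let s := PySem.List.slice tl (some i) none
      let mismatches :=
        (PySem.List.pyRange 0 (pl.length : Int)).foldl
          (fun m j =>
            if PySem.List.pyGetD s j ' ' == PySem.List.pyGetD pl j ' ' then m - 1 else m)
          ((pl.length : Int))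
      if n ≥ mismatches then occurrences ++ [i] else occurrences) []

-- ===== PORT B =====
-- literal port of B: a counts array over all alignments, updated column-major
-- (one pattern position j at a time across every alignment i), then filtered.
def naive_approximate_alt (t : String) (p : String) (n : Int) : List Int :=
  let tl := t.toList
  let pl := p.toList
  let width : Int := (tl.length : Int) - (pl.length : Int) + 1
  let counts : List Int :=
    (PySem.List.pyRange 0 (pl.length : Int)).foldl
      (fun cs j =>
        (PySem.List.enumerate cs).map
          (fun ic =>
            ic.2 + (if PySem.List.pyGetD tl (ic.1 + j) ' ' != PySem.List.pyGetD pl j ' ' then 1 else 0)))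
      (List.replicate width.toNat 0)
  (PySem.List.pyRange 0 (counts.length : Int)).filter
    (fun i => decide (PySem.List.pyGetD counts i 0 ≤ n))

-- ===== PRECONDITION & SPEC =====
def Spec_naive_approximate (t : String) (p : String) (n : Int) (out : List Int) : Prop := out = naive_approximate_alt t p n
instance (t : String) (p : String) (n : Int) (out : List Int) : Decidable (Spec_naive_approximate t p n out) := by unfold Spec_naive_approximate; infer_instance

-- ===== CLAIM (what is proved, stated in full; the proofs are below) =====
def Claim_equal_naive_approximate : Prop := ∀ (t : String) (p : String) (n : Int), Dom_naive_approximate t p n → Spec_naive_approximate t p n (naive_approximate t p n)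

-- ===== LEMMAS AND PROOFS =====

-- number of mismatching pattern positions (among the columns js) at alignment i
def pvMis (tl pl : List Char) (js : List Int) (i : Nat) : Int :=
  ((js.filter (fun j => PySem.List.pyGetD tl ((i : Int) + j) ' ' != PySem.List.pyGetD pl j ' ')).length : Int)

theorem pvMis_nil (tl pl : List Char) (i : Nat) : pvMis tl pl [] i = 0 := rfl

theorem pvMis_cons (tl pl : List Char) (j : Int) (js : List Int) (i : Nat) :
    pvMis tl pl (j :: js) i =
      (if PySem.List.pyGetD tl ((i : Int) + j) ' ' != PySem.List.pyGetD pl j ' ' then 1 else 0)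
        + pvMis tl pl js i := by
  by_cases h : PySem.List.pyGetD tl ((i : Int) + j) ' ' != PySem.List.pyGetD pl j ' ' <;>
    simp [pvMis, h] <;> omega

theorem pvPyRange_zero_eq (W : Int) :
    PySem.List.pyRange 0 W = (List.range W.toNat).map (fun (k : Nat) => (k : Int)) := by
  by_cases h : 0 ≤ W
  · rw [show W = (W.toNat : Int) from (Int.toNat_of_nonneg h).symm,
      PySem.List.pyRange_zero_natCast]
    simp [max_eq_left h]
  · rw [Int.toNat_of_nonpos (le_of_not_ge h)]
    simp only [List.range_zero, List.map_nil]
    refine List.eq_nil_iff_forall_not_mem.mpr (fun x hx => ?_)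
    have := PySem.List.mem_pyRange_one.mp hx
    omega

theorem pvEnum_map_range {w : Nat} (g : Nat → Int) :
    PySem.List.enumerate ((List.range w).map g)
      = (List.range w).map (fun (k : Nat) => ((k : Int), g k)) := by
  rw [PySem.List.enumerate_eq_map_pyRange _ 0]
  have hlen : PySem.List.len ((List.range w).map g) = (w : Int) := by
    simp [PySem.List.len]
  rw [hlen, PySem.List.pyRange_zero_natCast, List.map_map]
  refine List.map_congr_left (fun k hk => ?_)
  have hk' : k < w := List.mem_range.mp hk
  simp [PySem.List.pyGetD_natCast, List.getD_eq_getElem?_getD, List.getElem?_range hk']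

-- B's column loop: after processing the columns js, entry i of the counts array
-- is its initial value plus the number of mismatching columns at alignment i.
theorem pvCounts_fold (tl pl : List Char) (w : Nat) (js : List Int) (g : Nat → Int) :
    js.foldl
      (fun cs j =>
        (PySem.List.enumerate cs).map
          (fun ic =>
            ic.2 + (if PySem.List.pyGetD tl (ic.1 + j) ' ' != PySem.List.pyGetD pl j ' ' then 1 else 0)))
      ((List.range w).map g)
      = (List.range w).map (fun i => g i + pvMis tl pl js i) := by
  induction js generalizing g with
  | nil => simp [pvMis_nil]
  | cons j js ih =>
    simp only [List.foldl_cons]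
    rw [pvEnum_map_range g, List.map_map]
    have hstep :
        ((fun ic : Int × Int =>
            ic.2 + (if PySem.List.pyGetD tl (ic.1 + j) ' ' != PySem.List.pyGetD pl j ' ' then 1 else 0))
          ∘ (fun (k : Nat) => ((k : Int), g k)))
          = fun (k : Nat) =>
              g k + (if PySem.List.pyGetD tl ((k : Int) + j) ' ' != PySem.List.pyGetD pl j ' ' then 1 else 0) := by
      funext k
      rfl
    rw [hstep, ih]
    refine List.map_congr_left (fun k _ => ?_)
    rw [pvMis_cons]
    ring

-- A's inner loop counts down from the start value once per matching column.
theorem pvFoldl_sub_if {α : Type} (c : α → Bool) (l : List α) (a : Int) :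
    l.foldl (fun m x => if c x then m - 1 else m) a = a - (l.countP c : Int) := by
  induction l generalizing a with
  | nil => simp
  | cons x l ih => by_cases h : c x <;> simp [h, ih] <;> ring

theorem pvCountP_not_add {α : Type} (p : α → Bool) (l : List α) :
    l.countP (fun a => !p a) + l.countP p = l.length := by
  induction l with
  | nil => simp
  | cons a l ih => by_cases h : p a <;> simp [h] <;> omega

theorem pvGetD_drop (l : List Char) (k j : Nat) (d : Char) :
    (l.drop k).getD j d = l.getD (k + j) d := by
  simp [List.getD_eq_getElem?_getD, List.getElem?_drop]

theorem naive_approximate_eq (t p : String) (n : Int) :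
    naive_approximate t p n = naive_approximate_alt t p n := by
  unfold naive_approximate naive_approximate_alt
  simp only []
  set tl := t.toList with htl
  set pl := p.toList with hpl
  set W : Int := (tl.length : Int) - (pl.length : Int) + 1 with hW
  -- B side: counts characterisation
  have hrepl : List.replicate W.toNat (0 : Int) = (List.range W.toNat).map (fun _ => (0 : Int)) := by
    simp [List.map_const']
  rw [hrepl, pvCounts_fold tl pl W.toNat (PySem.List.pyRange 0 (pl.length : Int)) (fun _ => 0)]
  set js := PySem.List.pyRange 0 (pl.length : Int) with hjs
  set cnt : Nat → Int := fun i => 0 + pvMis tl pl js i with hcnt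
  have hlen : (((List.range W.toNat).map cnt).length : Int) = ((W.toNat : Nat) : Int) := by simp
  rw [hlen]
  -- A side: turn the fold into a filter
  rw [pvPyRange_zero_eq W, PySem.List.pyRange_zero_natCast,
    PySem.List.foldl_append_ite_eq_filter
      (fun i => n ≥ js.foldl
        (fun m j =>
          if PySem.List.pyGetD (PySem.List.slice tl (some i) none) j ' ' == PySem.List.pyGetD pl j ' '
          then m - 1 else m) ((pl.length : Int)))]
  simp only [List.nil_append]
  refine List.filter_congr (fun x hx => ?_)
  obtain ⟨i, hi, rfl⟩ := List.mem_map.mp hx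
  have hiw : i < W.toNat := List.mem_range.mp hi
  have hib : i + pl.length ≤ tl.length := by
    rw [hW] at hiw; omega
  have hs : PySem.List.slice tl (some (i : Int)) none = tl.drop i :=
    PySem.List.slice_from_natCast tl i
  -- evaluate A's inner fold
  have hinner :
      js.foldl
        (fun m j =>
          if PySem.List.pyGetD (PySem.List.slice tl (some (i : Int)) none) j ' ' == PySem.List.pyGetD pl j ' '
          then m - 1 else m) ((pl.length : Int))
        = (pl.length : Int) -
            (js.countP (fun j =>
              PySem.List.pyGetD (PySem.List.slice tl (some (i : Int)) none) j ' ' == PySem.List.pyGetD pl j ' ') : Int) :=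
    pvFoldl_sub_if _ _ _
  -- on the columns actually visited, A's match test is the negation of B's mismatch test
  have hmatch : ∀ j ∈ js,
      (PySem.List.pyGetD (PySem.List.slice tl (some (i : Int)) none) j ' ' == PySem.List.pyGetD pl j ' ')
        = !(PySem.List.pyGetD tl ((i : Int) + j) ' ' != PySem.List.pyGetD pl j ' ') := by
    intro j hj
    have hj0 : 0 ≤ j := (PySem.List.mem_pyRange_one.mp hj).1
    obtain ⟨j0, rfl⟩ : ∃ j0 : Nat, j = (j0 : Int) := ⟨j.toNat, (Int.toNat_of_nonneg hj0).symm⟩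
    rw [hs]
    have hcast : ((i : Int) + (j0 : Int)) = ((i + j0 : Nat) : Int) := by omega
    rw [hcast, PySem.List.pyGetD_natCast, PySem.List.pyGetD_natCast, PySem.List.pyGetD_natCast,
      pvGetD_drop]
    simp [bne]
  have hcomp :
      (js.countP (fun j =>
          PySem.List.pyGetD (PySem.List.slice tl (some (i : Int)) none) j ' ' == PySem.List.pyGetD pl j ' ') : Int)
        + pvMis tl pl js i = (js.length : Int) := by
    have h1 : js.countP (fun j =>
          PySem.List.pyGetD (PySem.List.slice tl (some (i : Int)) none) j ' ' == PySem.List.pyGetD pl j ' ')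
        = js.countP (fun j => !(PySem.List.pyGetD tl ((i : Int) + j) ' ' != PySem.List.pyGetD pl j ' ')) :=
      List.countP_congr (fun j hj => by rw [hmatch j hj])
    have h2 : pvMis tl pl js i
        = (js.countP (fun j => PySem.List.pyGetD tl ((i : Int) + j) ' ' != PySem.List.pyGetD pl j ' ') : Int) := by
      simp [pvMis, List.countP_eq_length_filter]
    have h3 := pvCountP_not_add
      (fun j => PySem.List.pyGetD tl ((i : Int) + j) ' ' != PySem.List.pyGetD pl j ' ') js
    rw [h1, h2]
    omega
  have hjslen : js.length = pl.length := by
    rw [hjs, PySem.List.pyRange_zero_natCast]; simp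
  have hgetB : PySem.List.pyGetD ((List.range W.toNat).map cnt) (i : Int) 0 = pvMis tl pl js i := by
    rw [PySem.List.pyGetD_natCast, PySem.List.getD_map_range cnt W.toNat i 0 hiw]
    simp [hcnt]
  simp only [hinner, hgetB]
  rw [hjslen] at hcomp
  rw [decide_eq_decide]
  omega

-- ===== VERDICT (by name: the statement is the Claim_ definition above) =====
theorem naive_approximate_spec : Claim_equal_naive_approximate := by
  intro t p n _
  unfold Spec_naive_approximate
  exact naive_approximate_eq t p n
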